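-- pv_equiv track=rewrite | github.com/james5635/GeekForGeek-Data-Structure-and-Algorithm | array/max_rotation_sum/solution.py | max_sum_rotation_naive
-- ===== SOURCE A (Python) =====
-- from typing import List, Tuple
--
-- def max_sum_rotation_naive(arr: List[int]) -> Tuple[int, int]:
--     """
--     Find maximum sum of i*arr[i] using naive approach.
--     Try all rotations and compute sum for each.
--
--     Args:
--         arr: Input array
--
--     Returns:
--         Tuple of (max_sum, best_rotation)
--
--     Time: O(n²), Space: O(1)
--     """
--     n = len(arr)
--     if n == 0:
--         return 0, 0
--
--     max_sum = float("-inf")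
--     best_rotation = 0
--
--     for rotation in range(n):
--         current_sum = 0
--         for i in range(n):
--             # After rotation, element at index i was at index (i + rotation) % n
--             # But in our formula i*arr[i], we want original index contribution
--             # Actually, let's think differently:
--             # Rotation k means arr[k] moves to index 0, arr[k+1] to index 1, etc.
--             idx = (rotation + i) % n
--             current_sum += i * arr[idx]
--
--         if current_sum > max_sum:
--             max_sum = current_sum
--             best_rotation = rotation
--
--     return max_sum, best_rotation
-- ===== SOURCE B (Python) =====
-- from typing import List, Tuple
--
-- def max_sum_rotation_naive(arr: List[int]) -> Tuple[int, int]: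
--     """O(n) incremental version: S(r+1) = S(r) - total + n*arr[r]."""
--     n = len(arr)
--     if n == 0:
--         return 0, 0
--     total = sum(arr)
--     s = sum(i * v for i, v in enumerate(arr))
--     best, best_rotation = s, 0
--     for r in range(1, n):
--         s = s - total + n * arr[r - 1]
--         if s > best:
--             best, best_rotation = s, r
--     return best, best_rotation
-- ===== Notes on version B (the rewrite author's own statement) =====
-- stated objective: faster
-- what changed: Replaced the try-every-rotation double loop by a single pass that maintains the rotation sum incrementally via S(r) = S(r-1) - total + n*arr[r-1], keeping the first maximum exactly as A does.
import Mathlib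
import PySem

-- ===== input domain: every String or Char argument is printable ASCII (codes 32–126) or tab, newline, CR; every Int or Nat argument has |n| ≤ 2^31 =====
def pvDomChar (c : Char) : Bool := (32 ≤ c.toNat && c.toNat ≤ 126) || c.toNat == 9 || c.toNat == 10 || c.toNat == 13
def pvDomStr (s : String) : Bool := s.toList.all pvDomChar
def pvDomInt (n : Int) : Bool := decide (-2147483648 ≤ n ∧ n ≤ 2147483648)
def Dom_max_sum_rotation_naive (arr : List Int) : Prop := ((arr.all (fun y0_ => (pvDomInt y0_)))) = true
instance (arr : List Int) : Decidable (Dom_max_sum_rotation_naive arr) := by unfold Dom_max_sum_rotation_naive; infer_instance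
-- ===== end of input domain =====

-- B replaces A's O(n²) try-every-rotation double loop by a single O(n) pass using the
-- incremental update S(r) = S(r-1) - total + n*arr[r-1]; same (max_sum, best_rotation), first maximum kept.

-- ===== PORT A =====
-- float('-inf') initial max is modelled as Option Int with none (any int beats it);
-- the index (rotation + i) % n is always in range for n > 0, so pyGetD's default 0 is never used.
def max_sum_rotation_naive (arr : List Int) : Int × Int :=
  let n : Int := (arr.length : Int)
  if n = 0 then (0, 0)
  else
    let st := (PySem.List.pyRange 0 n 1).foldl
      (fun (st : Option Int × Int) rotation =>
        let cur := (PySem.List.pyRange 0 n 1).foldl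
          (fun c i => c + i * PySem.List.pyGetD arr (PySem.Int.mod (rotation + i) n) 0) 0
        match st.1 with
        | none => (some cur, rotation)
        | some m => if cur > m then (some cur, rotation) else st)
      ((none : Option Int), 0)
    (st.1.getD 0, st.2)

-- ===== PORT B =====
def max_sum_rotation_naive_alt (arr : List Int) : Int × Int :=
  let n : Int := (arr.length : Int)
  if n = 0 then (0, 0)
  else
    let total := arr.sum
    let s0 := (PySem.List.enumerate arr 0).foldl (fun acc p => acc + p.1 * p.2) 0
    let st := (PySem.List.pyRange 1 n 1).foldl
      (fun (st : Int × Int × Int) r =>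
        let s := st.1 - total + n * PySem.List.pyGetD arr (r - 1) 0
        if s > st.2.1 then (s, (s, r)) else (s, st.2))
      (s0, (s0, 0))
    (st.2.1, st.2.2)

-- ===== PRECONDITION & SPEC =====
def Spec_max_sum_rotation_naive (arr : List Int) (out : Int × Int) : Prop := out = max_sum_rotation_naive_alt arr
instance (arr : List Int) (out : Int × Int) : Decidable (Spec_max_sum_rotation_naive arr out) := by unfold Spec_max_sum_rotation_naive; infer_instance

-- ===== CLAIM (what is proved, stated in full; the proofs are below) =====
def Claim_equal_max_sum_rotation_naive : Prop := ∀ (arr : List Int), Dom_max_sum_rotation_naive arr → Spec_max_sum_rotation_naive arr (max_sum_rotation_naive arr)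

-- ===== LEMMAS AND PROOFS =====

-- weighted sum Σ i * xs[i], via the recurrence wsum (a :: l) = wsum l + l.sum
def wsum : List Int → Int
  | [] => 0
  | _ :: l => wsum l + l.sum

-- value of rotation r: Σ i * (rotated arr)[i], the rotated array being drop r ++ take r
def rotv (arr : List Int) (r : Nat) : Int := wsum (arr.drop r ++ arr.take r)

lemma wsum_append_singleton (l : List Int) (a : Int) :
    wsum (l ++ [a]) = wsum l + (l.length : Int) * a := by
  induction l with
  | nil => simp [wsum]
  | cons b t ih => simp [wsum, ih, List.sum_append]; ring

-- indexing the rotated array = modular indexing of the original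
lemma rot_getD (arr : List Int) (r k : Nat) (hr : r < arr.length) (hk : k < arr.length) :
    arr.getD ((r + k) % arr.length) 0 = (arr.drop r ++ arr.take r).getD k 0 := by
  by_cases h : k < arr.length - r
  · have h1 : (r + k) % arr.length = r + k := Nat.mod_eq_of_lt (by omega)
    rw [h1, List.getD_eq_getElem _ _ (by omega),
        List.getD_eq_getElem _ _ (by simp; omega),
        List.getElem_append_left (by simp; omega)]
    simp
  · have h1 : (r + k) % arr.length = r + k - arr.length := by
      rw [Nat.mod_eq_sub_mod (by omega), Nat.mod_eq_of_lt (by omega)]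
    rw [h1, List.getD_eq_getElem _ _ (by omega),
        List.getD_eq_getElem _ _ (by simp; omega),
        List.getElem_append_right (by simp; omega)]
    simp
    congr 1
    omega

lemma sumGetD (xs : List Int) :
    ((List.range xs.length).map (fun k => xs.getD k 0)).sum = xs.sum := by
  induction xs with
  | nil => simp
  | cons a l ih =>
    simp only [List.length_cons, List.range_succ_eq_map, List.map_cons, List.map_map,
      Function.comp_def, List.getD_cons_zero, List.getD_cons_succ, List.sum_cons]
    rw [ih]

-- Σ_{k < |xs|} k * xs[k] = wsum xs
lemma sumIdx (xs : List Int) :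
    ((List.range xs.length).map (fun (k : Nat) => (k : Int) * xs.getD k 0)).sum = wsum xs := by
  induction xs with
  | nil => simp [wsum]
  | cons a l ih =>
    simp only [List.length_cons, List.range_succ_eq_map, List.map_cons, List.map_map,
      Function.comp_def, List.getD_cons_zero, List.getD_cons_succ, List.sum_cons, wsum]
    push_cast
    have h : ∀ k : Nat, ((k : Int) + 1) * l.getD k 0 = (k : Int) * l.getD k 0 + l.getD k 0 := by
      intro k; ring
    simp only [h, PySem.List.sum_map_add_int, ih, sumGetD]
    ring

-- B's starting sum: the enumerate fold computes wsum (+ s · total for a general start)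
lemma enum_sum (xs : List Int) : ∀ (s c : Int),
    (PySem.List.enumerate xs s).foldl (fun acc p => acc + p.1 * p.2) c
      = c + wsum xs + s * xs.sum := by
  induction xs with
  | nil => intro s c; simp [wsum]
  | cons a l ih =>
    intro s c
    rw [PySem.List.enumerate_cons]
    simp only [List.foldl_cons, ih, wsum, List.sum_cons]
    ring

-- the incremental recurrence S(r+1) = S(r) - total + n * arr[r]
lemma rot_step (arr : List Int) (r : Nat) (hr : r < arr.length) :
    rotv arr (r + 1) = rotv arr r - arr.sum + (arr.length : Int) * arr.getD r 0 := by
  have hdrop : arr.drop r = arr[r] :: arr.drop (r + 1) := List.drop_eq_getElem_cons hr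
  have htake : arr.take (r + 1) = arr.take r ++ [arr[r]] := by
    rw [List.take_add_one]
    simp [List.getElem?_eq_getElem hr]
  have hsplit : arr.sum = (arr.take r ++ arr.drop r).sum := by rw [List.take_append_drop]
  rw [List.sum_append, hdrop, List.sum_cons] at hsplit
  have hl : (arr.drop (r+1) ++ arr.take r).sum = arr.sum - arr[r] := by
    rw [List.sum_append]; omega
  have hlen : (((arr.drop (r+1) ++ arr.take r).length : Nat) : Int) = (arr.length : Int) - 1 := by
    simp; omega
  rw [rotv, rotv, htake, hdrop, ← List.append_assoc, wsum_append_singleton, hlen]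
  have h2 : arr[r] :: arr.drop (r+1) ++ arr.take r = arr[r] :: (arr.drop (r+1) ++ arr.take r) := rfl
  rw [h2, wsum, hl, List.getD_eq_getElem _ _ hr]
  ring

-- the two loops' step functions, abstracted over Nat indices
def stepA (arr : List Int) (st : Option Int × Int) (k : Nat) : Option Int × Int :=
  match st.1 with
  | none => (some (rotv arr k), (k : Int))
  | some m => if rotv arr k > m then (some (rotv arr k), (k : Int)) else st

def stepB (arr : List Int) (st : Int × Int × Int) (k : Nat) : Int × Int × Int :=
  let s := st.1 - arr.sum + (arr.length : Int) * arr.getD k 0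
  if s > st.2.1 then (s, (s, (k : Int) + 1)) else (s, st.2)

-- A's inner loop computes rotv
lemma inner_eq (arr : List Int) (r : Nat) (hr : r < arr.length) :
    ((List.range arr.length).map (fun (k : Nat) => (k : Int))).foldl
      (fun c i => c + i * PySem.List.pyGetD arr (PySem.Int.mod ((r : Int) + i) (arr.length : Int)) 0) 0
    = rotv arr r := by
  rw [List.foldl_map]
  rw [PySem.List.foldl_congr_mem _ _
      (fun (c : Int) (k : Nat) => c + (k : Int) * (arr.drop r ++ arr.take r).getD k 0) _
    (by
      intro acc k hkmem
      have hk : k < arr.length := List.mem_range.mp hkmem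
      have hmod : PySem.Int.mod ((r : Int) + (k : Int)) (arr.length : Int)
          = (((r + k) % arr.length : Nat) : Int) := by
        have h := PySem.Int.mod_natCast (r + k) arr.length
        push_cast at h ⊢
        simpa using h
      rw [hmod, PySem.List.pyGetD_natCast, rot_getD arr r k hr hk])]
  rw [PySem.List.foldl_add _ (fun k : Nat => (k : Int) * (arr.drop r ++ arr.take r).getD k 0)]
  have hlen : arr.length = (arr.drop r ++ arr.take r).length := by simp; omega
  rw [hlen, sumIdx]
  simp [rotv]

-- A's outer fold is the stepA fold over Nat indices
lemma foldA_eq (arr : List Int) :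
    (PySem.List.pyRange 0 (arr.length : Int) 1).foldl
      (fun (st : Option Int × Int) rotation =>
        let cur := (PySem.List.pyRange 0 (arr.length : Int) 1).foldl
          (fun c i => c + i * PySem.List.pyGetD arr (PySem.Int.mod (rotation + i) (arr.length : Int)) 0) 0
        match st.1 with
        | none => (some cur, rotation)
        | some m => if cur > m then (some cur, rotation) else st)
      ((none : Option Int), 0)
    = (List.range arr.length).foldl (stepA arr) ((none : Option Int), 0) := by
  conv_lhs => rw [PySem.List.pyRange_zero_nat]
  rw [List.foldl_map]
  apply PySem.List.foldl_congr_mem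
  intro acc k hk
  have hk' : k < arr.length := List.mem_range.mp hk
  simp only
  rw [inner_eq arr k hk']
  rfl

-- B's fold is the stepB fold over Nat indices
lemma foldB_eq (arr : List Int) (init : Int × Int × Int) :
    (PySem.List.pyRange 1 (arr.length : Int) 1).foldl
      (fun (st : Int × Int × Int) r =>
        let s := st.1 - arr.sum + (arr.length : Int) * PySem.List.pyGetD arr (r - 1) 0
        if s > st.2.1 then (s, (s, r)) else (s, st.2))
      init
    = (List.range (arr.length - 1)).foldl (stepB arr) init := by
  conv_lhs => rw [PySem.List.pyRange_one]
  rw [List.foldl_map]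
  have hn : ((arr.length : Int) - 1).toNat = arr.length - 1 := by omega
  rw [hn]
  apply PySem.List.foldl_congr_mem
  intro acc k hk
  have h1 : (1 : Int) + (k : Int) - 1 = ((k : Nat) : Int) := by ring
  simp only [h1, PySem.List.pyGetD_natCast]
  rw [stepB]
  have h2 : (1 : Int) + (k : Int) = (k : Int) + 1 := by ring
  simp only [h2]

-- loop invariant: after rotations 0..m (A) resp. 1..m (B) the two states agree,
-- and B's running sum is rotv arr m
lemma fold_inv (arr : List Int) : ∀ (m : Nat), m < arr.length →
    ((List.range (m+1)).foldl (stepA arr) ((none : Option Int), 0)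
      = (some (((List.range m).foldl (stepB arr) (rotv arr 0, (rotv arr 0, 0))).2.1),
         ((List.range m).foldl (stepB arr) (rotv arr 0, (rotv arr 0, 0))).2.2))
    ∧ ((List.range m).foldl (stepB arr) (rotv arr 0, (rotv arr 0, 0))).1 = rotv arr m := by
  intro m
  induction m with
  | zero => intro _; simp [stepA]
  | succ m ih =>
    intro hm
    obtain ⟨hA, hB⟩ := ih (by omega)
    have hBstep : (List.range (m+1)).foldl (stepB arr) (rotv arr 0, (rotv arr 0, 0))
        = stepB arr ((List.range m).foldl (stepB arr) (rotv arr 0, (rotv arr 0, 0))) m := by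
      rw [List.range_succ, List.foldl_append, List.foldl_cons, List.foldl_nil]
    have hs : ((List.range m).foldl (stepB arr) (rotv arr 0, (rotv arr 0, 0))).1
        - arr.sum + (arr.length : Int) * arr.getD m 0 = rotv arr (m+1) := by
      rw [hB, ← rot_step arr m (by omega)]
    constructor
    · rw [List.range_succ, List.foldl_append, hA, List.foldl_cons, List.foldl_nil,
          hBstep, stepA, stepB]
      simp only [hs]
      by_cases h : rotv arr (m+1) > ((List.range m).foldl (stepB arr) (rotv arr 0, (rotv arr 0, 0))).2.1
      · simp [h]
      · simp [h]
    · rw [hBstep, stepB]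
      simp only [hs]
      split <;> rfl

-- ===== VERDICT (by name: the statement is the Claim_ definition above) =====
theorem max_sum_rotation_naive_spec : Claim_equal_max_sum_rotation_naive := by
  intro arr _
  unfold Spec_max_sum_rotation_naive max_sum_rotation_naive max_sum_rotation_naive_alt
  rcases Nat.eq_zero_or_pos arr.length with h0 | hpos
  · simp [h0]
  · have hne : ((arr.length : Int) = 0) = False := eq_false (by omega)
    simp only [hne, if_false]
    rw [foldA_eq, foldB_eq]
    have hs0 : (PySem.List.enumerate arr 0).foldl (fun acc p => acc + p.1 * p.2) 0
        = rotv arr 0 := by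
      rw [enum_sum]
      simp [rotv]
    rw [hs0]
    have hm : arr.length = (arr.length - 1) + 1 := by omega
    obtain ⟨hA, _⟩ := fold_inv arr (arr.length - 1) (by omega)
    rw [hm, hA]
    simp
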